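-- pv_equiv track=rewrite | github.com/skfo763/Problem_Solving | psroadmap/bruteforce/1107.py | f
-- ===== SOURCE A (Python) =====
-- def f(input_list, count):
--     if count == 1:
--         return input_list
--     else:
--         temp_list = []
--         l = f(input_list, count - 1)
--         for i in input_list:
--             for j in l:
--                 temp_list.append(j + i)
--         return temp_list
-- ===== SOURCE B (Python) =====
-- def f(input_list, count):
--     result = input_list
--     for _ in range(count - 1):
--         result = [j + i for i in input_list for j in result]
--     return result
-- ===== Notes on version B (the rewrite author's own statement) =====
-- stated objective: idiomatic
-- what changed: Unrolled A's recursion on count into an iterative loop that rebuilds the result count-1 times with a list comprehension; no recursion and no repeated append calls.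
import Mathlib
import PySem

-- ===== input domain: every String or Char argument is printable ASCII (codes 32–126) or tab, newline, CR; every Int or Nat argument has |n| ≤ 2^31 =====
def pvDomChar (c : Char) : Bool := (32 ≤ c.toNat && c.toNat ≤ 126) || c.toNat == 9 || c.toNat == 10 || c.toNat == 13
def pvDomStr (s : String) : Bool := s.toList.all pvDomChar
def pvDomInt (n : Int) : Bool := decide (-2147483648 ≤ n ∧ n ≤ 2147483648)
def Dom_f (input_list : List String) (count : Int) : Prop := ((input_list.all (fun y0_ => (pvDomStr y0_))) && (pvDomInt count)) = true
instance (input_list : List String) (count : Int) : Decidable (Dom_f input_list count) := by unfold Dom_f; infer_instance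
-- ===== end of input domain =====

-- B unrolls A's recursion on count into an iterative loop (idiomatic; RETURN value only).

-- ===== PORT A =====
-- literal port of A's recursion; the 'count ≤ 0' guard only makes the recursion total:
-- Python exceeds the recursion limit there (RecursionError), excluded by Pre_f.
def f (input_list : List String) (count : Int) : List String :=
  if count = 1 then input_list
  else if count ≤ 0 then []
  else
    let l := f input_list (count - 1)
    input_list.foldl (fun temp_list i =>
      l.foldl (fun temp_list j => temp_list ++ [j ++ i]) temp_list) []
termination_by count.toNat
decreasing_by omega

-- ===== PORT B =====
def f_alt (input_list : List String) (count : Int) : List String :=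
  (PySem.List.pyRange 0 (count - 1) 1).foldl
    (fun result _ => input_list.flatMap (fun i => result.map (fun j => j ++ i)))
    input_list

-- ===== PRECONDITION & SPEC =====
-- Pre_f excludes count ≤ 0, where Python A raises RecursionError (infinite recursion).
def Pre_f (input_list : List String) (count : Int) : Prop := 1 ≤ count
instance (input_list : List String) (count : Int) : Decidable (Pre_f input_list count) := by unfold Pre_f; infer_instance
def pvWitness_f : List String × Int := (["a", "b"], 2)

def Spec_f (input_list : List String) (count : Int) (out : List String) : Prop := out = f_alt input_list count
instance (input_list : List String) (count : Int) (out : List String) : Decidable (Spec_f input_list count out) := by unfold Spec_f; infer_instance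

-- ===== CLAIM =====
def Claim_equal_f : Prop := ∀ (input_list : List String) (count : Int), Dom_f input_list count → Pre_f input_list count → Spec_f input_list count (f input_list count)

-- ===== LEMMAS AND PROOFS =====

-- B's body taken one more step of the loop
lemma f_alt_succ (input_list : List String) (n : Nat) :
    f_alt input_list ((n : Int) + 2) =
      input_list.flatMap (fun i => (f_alt input_list ((n : Int) + 1)).map (fun j => j ++ i)) := by
  unfold f_alt
  have h1 : ((n : Int) + 2) - 1 = ((n : Int) + 1) := by ring
  have h2 : ((n : Int) + 1) - 1 = (n : Int) := by ring
  rw [h1, h2, PySem.List.pyRange_one_succ_right (by omega), List.foldl_append]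
  rfl

-- A's nested append loops are the comprehension
lemma f_step (l input_list : List String) :
    input_list.foldl (fun temp_list i =>
      l.foldl (fun temp_list j => temp_list ++ [j ++ i]) temp_list) [] =
      input_list.flatMap (fun i => l.map (fun j => j ++ i)) := by
  have h : (fun (temp_list : List String) i =>
        l.foldl (fun temp_list j => temp_list ++ [j ++ i]) temp_list)
      = fun temp_list i => temp_list ++ l.map (fun j => j ++ i) := by
    funext temp_list i; exact PySem.List.foldl_append_singleton_eq_map ..
  rw [h, PySem.List.foldl_append_eq_flatMap]; simp

lemma f_eq_alt (input_list : List String) (n : Nat) :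
    f input_list ((n : Int) + 1) = f_alt input_list ((n : Int) + 1) := by
  induction n with
  | zero =>
    unfold f f_alt
    simp [PySem.List.pyRange]
  | succ m ih =>
    have hc : ((m : Int) + 1 + 1) = ((m : Int) + 2) := by ring
    rw [show ((m : Nat) + 1 : Nat) = (m + 1) from rfl]
    push_cast
    unfold f
    rw [if_neg (by omega), if_neg (by omega)]
    have hsub : ((m : Int) + 1 + 1) - 1 = ((m : Int) + 1) := by ring
    rw [hsub, ih, f_step, hc, f_alt_succ]

-- ===== VERDICT =====
theorem f_spec : Claim_equal_f := by
  intro input_list count _ hpre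
  unfold Spec_f
  obtain ⟨n, hn⟩ : ∃ n : Nat, count = (n : Int) + 1 :=
    ⟨(count - 1).toNat, by unfold Pre_f at hpre; omega⟩
  rw [hn, f_eq_alt]
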